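-- pv_equiv track=rewrite | github.com/VladmirU/SW_Solutions | lesson_2/numbers/Evil or Odious.py | evil
-- ===== SOURCE A (Python) =====
-- def evil(n):
--     edited_number = n
--     count = 0
--     while edited_number > 0:
--     	if edited_number % 2 == 1:
--     		count += 1
--     	edited_number //= 2
--     if count & 1 == 0:
--         return "It's Evil!"
--     else:
--         return "It's Odious!"
-- ===== SOURCE B (Python) =====
-- def evil(n):
--     count = 0
--     m = n
--     while m > 0:
--         m &= m - 1
--         count += 1
--     if count & 1 == 0:
--         return "It's Evil!"
--     else:
--         return "It's Odious!"
-- ===== Notes on version B (the rewrite author's own statement) =====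
-- stated objective: alternative
-- what changed: Replaces the per-bit halving loop (test n%2, n//=2 each iteration) with Brian Kernighan's iteration m &= m-1, which clears one set bit per step, so the loop runs once per set bit instead of once per bit position.
import Mathlib
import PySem

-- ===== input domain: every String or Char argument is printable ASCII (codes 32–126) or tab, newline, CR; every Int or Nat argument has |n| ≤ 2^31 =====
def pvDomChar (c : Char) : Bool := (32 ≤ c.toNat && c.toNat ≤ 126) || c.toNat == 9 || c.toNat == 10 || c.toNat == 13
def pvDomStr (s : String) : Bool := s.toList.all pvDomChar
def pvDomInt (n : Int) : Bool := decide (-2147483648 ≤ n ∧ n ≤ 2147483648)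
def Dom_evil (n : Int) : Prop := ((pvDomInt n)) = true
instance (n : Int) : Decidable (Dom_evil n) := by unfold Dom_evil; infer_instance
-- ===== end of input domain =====

-- B replaces A's per-bit-position halving loop by Kernighan's m &= m-1 iteration (one step per set bit); same result.

-- ===== PORT A =====
-- 'while edited_number > 0: if edited_number % 2 == 1: count += 1; edited_number //= 2'
def evilLoop (edited : Int) (count : Int) : Int :=
  if edited > 0 then
    evilLoop (PySem.Int.floordiv edited 2)
      (if PySem.Int.mod edited 2 = 1 then count + 1 else count)
  else count
termination_by edited.toNat
decreasing_by
  rename_i h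
  rw [PySem.Int.floordiv_eq_ediv_of_pos (by omega)]
  omega

def evil (n : Int) : String :=
  let count := evilLoop n 0
  if PySem.Int.band count 1 = 0 then "It's Evil!" else "It's Odious!"

-- ===== PORT B =====
-- 'while m > 0: m &= m - 1; count += 1'
def kernLoop (m : Int) (count : Int) : Int :=
  if m > 0 then kernLoop (PySem.Int.band m (m - 1)) (count + 1) else count
termination_by m.toNat
decreasing_by
  rename_i h
  rw [PySem.Int.band_of_nonneg (by omega) (by omega)]
  have h1 : m.toNat &&& (m - 1).toNat ≤ (m - 1).toNat := Nat.and_le_right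
  omega

def evil_alt (n : Int) : String :=
  let count := kernLoop n 0
  if PySem.Int.band count 1 = 0 then "It's Evil!" else "It's Odious!"

-- ===== PRECONDITION & SPEC =====
def Spec_evil (n : Int) (out : String) : Prop := out = evil_alt n
instance (n : Int) (out : String) : Decidable (Spec_evil n out) := by unfold Spec_evil; infer_instance

-- ===== CLAIM (what is proved, stated in full; the proofs are below) =====
def Claim_equal_evil : Prop := ∀ (n : Int), Dom_evil n → Spec_evil n (evil n)

-- ===== LEMMAS AND PROOFS =====

lemma pop_even (k : Nat) :
    PySem.Int.bitCount ((2 * k : Nat) : Int) = PySem.Int.bitCount (k : Int) := by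
  rcases Nat.eq_zero_or_pos k with hk | hk
  · subst hk; rfl
  · have := PySem.Int.bitCount_natCast (m := 2 * k) (by omega)
    simpa [Nat.mul_mod_right, Nat.mul_div_cancel_left _ (by norm_num : 0 < 2)] using this

lemma pop_odd (k : Nat) :
    PySem.Int.bitCount ((2 * k + 1 : Nat) : Int) = PySem.Int.bitCount (k : Int) + 1 := by
  have := PySem.Int.bitCount_natCast (m := 2 * k + 1) (by omega)
  have h2 : (2 * k + 1) % 2 = 1 := by omega
  have h3 : (2 * k + 1) / 2 = k := by omega
  rw [this, h2, h3, Nat.add_comm]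

lemma land_even_odd (a b : Nat) : (2 * a) &&& (2 * b + 1) = 2 * (a &&& b) := by
  have := Nat.land_bit false a true b
  simpa [Nat.bit] using this

lemma land_odd_even (a b : Nat) : (2 * a + 1) &&& (2 * b) = 2 * (a &&& b) := by
  have := Nat.land_bit true a false b
  simpa [Nat.bit] using this

-- Kernighan's identity: clearing the lowest set bit drops the popcount by one.
lemma kern_nat : ∀ n : Nat, 0 < n →
    PySem.Int.bitCount ((n &&& (n - 1) : Nat) : Int) + 1 = PySem.Int.bitCount (n : Int) := by
  intro n
  induction n using Nat.strong_induction_on with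
  | _ n ih =>
    intro hn
    rcases Nat.even_or_odd n with ⟨k, hk⟩ | ⟨k, hk⟩
    · -- n = 2k, k > 0 ; n-1 = 2(k-1)+1
      have hkpos : 0 < k := by omega
      have hsub : n - 1 = 2 * (k - 1) + 1 := by omega
      have hn2 : n = 2 * k := by omega
      have hband : n &&& (n - 1) = 2 * (k &&& (k - 1)) := by
        rw [hsub, hn2]
        simpa using land_even_odd k (k - 1)
      rw [hband, pop_even, hn2, pop_even]
      exact ih k (by omega) hkpos
    · -- n = 2k+1 ; n-1 = 2k ; (2k+1)&&&(2k) = 2k... actually = 2*(k&&&k) = 2k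
      have hn2 : n = 2 * k + 1 := by omega
      have hsub : n - 1 = 2 * k := by omega
      have hband : n &&& (n - 1) = 2 * k := by
        rw [hsub, hn2]
        simpa [Nat.and_self] using land_odd_even k k
      rw [hband, pop_even, hn2, pop_odd]

lemma evilLoop_eq (N : Nat) : ∀ m c : Int, 0 ≤ m → m.toNat ≤ N →
    evilLoop m c = c + (PySem.Int.bitCount m : Int) := by
  induction N with
  | zero =>
    intro m c hm hN
    have : m = 0 := by omega
    subst this
    rw [evilLoop]
    simp [PySem.Int.bitCount_zero]
  | succ N ih =>
    intro m c hm hN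
    rw [evilLoop]
    by_cases hpos : m > 0
    · simp only [if_pos hpos]
      have hdiv : PySem.Int.floordiv m 2 = m / 2 :=
        PySem.Int.floordiv_eq_ediv_of_pos (by omega)
      have hrec := ih (PySem.Int.floordiv m 2)
        (if PySem.Int.mod m 2 = 1 then c + 1 else c)
        (by rw [hdiv]; omega) (by rw [hdiv]; omega)
      rw [hrec, PySem.Int.bitCount_of_pos hpos]
      have hmod : PySem.Int.mod m 2 = m % 2 := PySem.Int.mod_eq_emod_of_pos (by omega)
      rcases Int.emod_two_eq_zero_or_one m with h2 | h2
      · rw [hmod, h2]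
        norm_num
      · rw [hmod, h2]
        norm_num
        omega
    · simp only [if_neg hpos]
      have : m = 0 := by omega
      subst this
      simp [PySem.Int.bitCount_zero]

lemma kernLoop_eq (N : Nat) : ∀ m c : Int, 0 ≤ m → m.toNat ≤ N →
    kernLoop m c = c + (PySem.Int.bitCount m : Int) := by
  induction N with
  | zero =>
    intro m c hm hN
    have : m = 0 := by omega
    subst this
    rw [kernLoop]
    simp [PySem.Int.bitCount_zero]
  | succ N ih =>
    intro m c hm hN
    rw [kernLoop]
    by_cases hpos : m > 0
    · simp only [if_pos hpos]
      have hband : PySem.Int.band m (m - 1) = ((m.toNat &&& (m - 1).toNat : Nat) : Int) :=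
        PySem.Int.band_of_nonneg (by omega) (by omega)
      have hle : m.toNat &&& (m - 1).toNat ≤ (m - 1).toNat := Nat.and_le_right
      have hrec := ih (PySem.Int.band m (m - 1)) (c + 1)
        (by rw [hband]; positivity)
        (by rw [hband]; simp only [Int.toNat_natCast]; omega)
      rw [hrec, hband]
      have hkn := kern_nat m.toNat (by omega)
      have hsub : (m - 1).toNat = m.toNat - 1 := by omega
      have hm' : ((m.toNat : Nat) : Int) = m := by omega
      rw [hm'] at hkn
      rw [hsub]
      omega
    · simp only [if_neg hpos]
      have : m = 0 := by omega
      subst this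
      simp [PySem.Int.bitCount_zero]

lemma counts_eq (n : Int) : evilLoop n 0 = kernLoop n 0 := by
  by_cases h : 0 ≤ n
  · rw [evilLoop_eq n.toNat n 0 h le_rfl, kernLoop_eq n.toNat n 0 h le_rfl]
  · rw [evilLoop, kernLoop]
    simp [show ¬ n > 0 by omega]

-- ===== VERDICT (by name: the statement is the Claim_ definition above) =====
theorem evil_spec : Claim_equal_evil := by
  intro n _
  unfold Spec_evil evil evil_alt
  rw [counts_eq]
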